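-- pv_equiv track=rewrite | github.com/Khairajani/leetcode_repo | 0033-search-in-rotated-sorted-array/0033-search-in-rotated-sorted-array.py | find_occurence
-- ===== SOURCE A (Python) =====
-- def find_occurence(nums, start,end,target,flag=None):
--     target_index = -1
--     while start<=end:
--         mid = start + (end-start)//2
--         if target == nums[mid]:
--             target_index = mid
--             if flag=="first":
--                 end = mid-1
--             elif flag=="last":
--                 start = mid+1
--             else:
--                 break
--         elif target < nums[mid]:
--             end = mid-1
--         elif target > nums[mid]:
--             start = mid+1
--
--     return target_index
-- ===== SOURCE B (Python) =====
-- def _any(nums, lo, hi, target):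
--     if lo > hi:
--         return -1
--     mid = lo + (hi - lo) // 2
--     v = nums[mid]
--     if target == v:
--         return mid
--     if target < v:
--         return _any(nums, lo, mid - 1, target)
--     return _any(nums, mid + 1, hi, target)
--
--
-- def _first(nums, lo, hi, target):
--     if lo > hi:
--         return -1
--     mid = lo + (hi - lo) // 2
--     v = nums[mid]
--     if target == v:
--         r = _first(nums, lo, mid - 1, target)
--         return mid if r == -1 else r
--     if target < v:
--         return _first(nums, lo, mid - 1, target)
--     return _first(nums, mid + 1, hi, target)
--
--
-- def _last(nums, lo, hi, target):
--     if lo > hi: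
--         return -1
--     mid = lo + (hi - lo) // 2
--     v = nums[mid]
--     if target == v:
--         r = _last(nums, mid + 1, hi, target)
--         return mid if r == -1 else r
--     if target < v:
--         return _last(nums, lo, mid - 1, target)
--     return _last(nums, mid + 1, hi, target)
--
--
-- def find_occurence(nums, start, end, target, flag=None):
--     if flag == "first":
--         return _first(nums, start, end, target)
--     if flag == "last":
--         return _last(nums, start, end, target)
--     return _any(nums, start, end, target)
-- ===== Notes on version B (the rewrite author's own statement) =====
-- stated objective: alternative
-- what changed: Replaces A's single while-loop that re-tests the flag every iteration and threads a target_index accumulator with a one-time dispatch on flag to three specialized recursive searches (_any/_first/_last), each a plain recursion on the half-interval with no mutable state.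
-- outside the precondition, e.g. on find_occurence([1, 2, 3], -3, 2, 1, None): A returns -3, B returns -3; on find_occurence([-1, 1, 2, 3, 4, 5, 5, 5], -7, 0, 5, 'last'): A returns -1, B returns -2
import Mathlib
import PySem

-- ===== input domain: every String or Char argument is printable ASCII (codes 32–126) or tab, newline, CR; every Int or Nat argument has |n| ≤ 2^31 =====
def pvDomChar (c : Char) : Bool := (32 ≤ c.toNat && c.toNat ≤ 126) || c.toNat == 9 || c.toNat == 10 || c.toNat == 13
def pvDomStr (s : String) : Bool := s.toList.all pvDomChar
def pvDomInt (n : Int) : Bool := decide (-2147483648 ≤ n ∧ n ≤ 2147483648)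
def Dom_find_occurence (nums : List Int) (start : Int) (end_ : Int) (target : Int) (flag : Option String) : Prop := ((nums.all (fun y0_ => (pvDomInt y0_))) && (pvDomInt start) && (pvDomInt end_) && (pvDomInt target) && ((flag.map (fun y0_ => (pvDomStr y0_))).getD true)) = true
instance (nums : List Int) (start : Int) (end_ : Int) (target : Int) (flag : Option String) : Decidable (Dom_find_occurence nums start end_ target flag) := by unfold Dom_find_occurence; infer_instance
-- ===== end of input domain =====

-- B dispatches once on flag to three specialized recursive searches (_any/_first/_last)
-- instead of A's single while-loop with a target_index accumulator re-testing flag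
-- every iteration (objective: alternative decomposition, same O(log n) cost).

-- termination helpers for the interval recursions (cited by name in decreasing_by)
theorem pv_shrink_left (lo hi : Int) (h : lo ≤ hi) :
    (lo + PySem.Int.floordiv (hi - lo) 2 - 1 - lo + 1).toNat < (hi - lo + 1).toNat := by
  have h2 := PySem.Int.floordiv_two_mid_bounds (lo := 0) (hi := hi - lo) (by omega)
  simp only [zero_add] at h2
  omega

theorem pv_shrink_right (lo hi : Int) (h : lo ≤ hi) :
    (hi - (lo + PySem.Int.floordiv (hi - lo) 2 + 1) + 1).toNat < (hi - lo + 1).toNat := by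
  have h2 := PySem.Int.floordiv_two_mid_bounds (lo := 0) (hi := hi - lo) (by omega)
  simp only [zero_add] at h2
  omega

-- ===== PORT A =====
-- the while-loop of A: state (start, end_, target_index); branches in A's order
def find_occurence_loop (nums : List Int) (target : Int) (flag : Option String)
    (start end_ ti : Int) : Int :=
  if _h : start ≤ end_ then
    let mid := start + PySem.Int.floordiv (end_ - start) 2
    match PySem.List.pyGet? nums mid with
    | none => ti        -- Python raises IndexError here; outside Pre_
    | some v =>
      if target = v then
        if flag = some "first" then find_occurence_loop nums target flag start (mid - 1) mid
        else if flag = some "last" then find_occurence_loop nums target flag (mid + 1) end_ mid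
        else mid        -- break with target_index = mid
      else if target < v then find_occurence_loop nums target flag start (mid - 1) ti
      else find_occurence_loop nums target flag (mid + 1) end_ ti
  else ti
termination_by (end_ - start + 1).toNat
decreasing_by
  · exact pv_shrink_left start end_ _h
  · exact pv_shrink_right start end_ _h
  · exact pv_shrink_left start end_ _h
  · exact pv_shrink_right start end_ _h

def find_occurence (nums : List Int) (start : Int) (end_ : Int) (target : Int) (flag : Option String) : Int :=
  find_occurence_loop nums target flag start end_ (-1)

-- ===== PORT B =====
-- three specialized searches; the flag is consulted only once, in find_occurence_alt
def fo_any (nums : List Int) (lo hi target : Int) : Int :=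
  if _h : lo > hi then -1
  else
    match PySem.List.pyGet? nums (lo + PySem.Int.floordiv (hi - lo) 2) with
    | none => -1        -- Python raises IndexError here; outside Pre_
    | some v =>
      let mid := lo + PySem.Int.floordiv (hi - lo) 2
      if target = v then mid
      else if target < v then fo_any nums lo (mid - 1) target
      else fo_any nums (mid + 1) hi target
termination_by (hi - lo + 1).toNat
decreasing_by
  all_goals first
    | exact pv_shrink_left lo hi (Int.not_lt.mp _h)
    | exact pv_shrink_right lo hi (Int.not_lt.mp _h)

def fo_first (nums : List Int) (lo hi target : Int) : Int :=
  if _h : lo > hi then -1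
  else
    match PySem.List.pyGet? nums (lo + PySem.Int.floordiv (hi - lo) 2) with
    | none => -1        -- Python raises IndexError here; outside Pre_
    | some v =>
      let mid := lo + PySem.Int.floordiv (hi - lo) 2
      if target = v then
        let r := fo_first nums lo (mid - 1) target
        if r = -1 then mid else r
      else if target < v then fo_first nums lo (mid - 1) target
      else fo_first nums (mid + 1) hi target
termination_by (hi - lo + 1).toNat
decreasing_by
  all_goals first
    | exact pv_shrink_left lo hi (Int.not_lt.mp _h)
    | exact pv_shrink_right lo hi (Int.not_lt.mp _h)

def fo_last (nums : List Int) (lo hi target : Int) : Int :=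
  if _h : lo > hi then -1
  else
    match PySem.List.pyGet? nums (lo + PySem.Int.floordiv (hi - lo) 2) with
    | none => -1        -- Python raises IndexError here; outside Pre_
    | some v =>
      let mid := lo + PySem.Int.floordiv (hi - lo) 2
      if target = v then
        let r := fo_last nums (mid + 1) hi target
        if r = -1 then mid else r
      else if target < v then fo_last nums lo (mid - 1) target
      else fo_last nums (mid + 1) hi target
termination_by (hi - lo + 1).toNat
decreasing_by
  all_goals first
    | exact pv_shrink_left lo hi (Int.not_lt.mp _h)
    | exact pv_shrink_right lo hi (Int.not_lt.mp _h)

def find_occurence_alt (nums : List Int) (start : Int) (end_ : Int) (target : Int) (flag : Option String) : Int :=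
  if flag = some "first" then fo_first nums start end_ target
  else if flag = some "last" then fo_last nums start end_ target
  else fo_any nums start end_ target

-- ===== PRECONDITION & SPEC =====
-- Pre_ excludes nonempty intervals reaching a negative start or an end ≥ len(nums):
-- there A may raise IndexError, and where it returns it does so via Python's
-- negative-index wraparound, whose index -1 collides with the -1 "not found" sentinel.
def Pre_find_occurence (nums : List Int) (start : Int) (end_ : Int) (target : Int) (flag : Option String) : Prop :=
  start > end_ ∨ (0 ≤ start ∧ end_ < (nums.length : Int))
instance (nums : List Int) (start : Int) (end_ : Int) (target : Int) (flag : Option String) : Decidable (Pre_find_occurence nums start end_ target flag) := by unfold Pre_find_occurence; infer_instance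

def pvWitness_find_occurence : List Int × Int × Int × Int × Option String :=
  ([1, 3, 3, 5], 0, 3, 3, some "first")

def Spec_find_occurence (nums : List Int) (start : Int) (end_ : Int) (target : Int) (flag : Option String) (out : Int) : Prop := out = find_occurence_alt nums start end_ target flag
instance (nums : List Int) (start : Int) (end_ : Int) (target : Int) (flag : Option String) (out : Int) : Decidable (Spec_find_occurence nums start end_ target flag out) := by unfold Spec_find_occurence; infer_instance

-- ===== CLAIM (what is proved, stated in full; the proofs are below) =====
def Claim_equal_find_occurence : Prop := ∀ (nums : List Int) (start : Int) (end_ : Int) (target : Int) (flag : Option String), Dom_find_occurence nums start end_ target flag → Pre_find_occurence nums start end_ target flag → Spec_find_occurence nums start end_ target flag (find_occurence nums start end_ target flag)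

-- ===== LEMMAS AND PROOFS =====

-- With flag = "first", A's loop with accumulator ti equals fo_first with "-1 read as ti";
-- under Pre_ every hit index mid is ≥ 0, so it never collides with the -1 sentinel.
theorem loop_eq_first (nums : List Int) (target : Int) :
    ∀ (n : Nat) (s e ti : Int), (e - s + 1).toNat ≤ n →
    (s > e ∨ (0 ≤ s ∧ e < (nums.length : Int))) →
    find_occurence_loop nums target (some "first") s e ti =
      (if fo_first nums s e target = -1 then ti else fo_first nums s e target) := by
  intro n
  induction n with
  | zero =>
    intro s e ti hn hpre
    have hse : ¬ s ≤ e := by omega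
    rw [find_occurence_loop, fo_first]
    simp [hse, (show s > e by omega)]
  | succ n ih =>
    intro s e ti hn hpre
    by_cases hse : s ≤ e
    · have hb : 0 ≤ s ∧ e < (nums.length : Int) := by omega
      have h2 := PySem.Int.floordiv_two_mid_bounds (lo := 0) (hi := e - s) (by omega)
      simp only [zero_add] at h2
      set mid := s + PySem.Int.floordiv (e - s) 2 with hmid
      have hget := PySem.List.pyGet?_eq_some_getElem (xs := nums) (i := mid) (by omega) (by omega)
      rw [find_occurence_loop, fo_first]
      simp only [dif_pos hse, dif_neg (show ¬ s > e by omega), ← hmid, hget]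
      by_cases hv : target = nums[mid.toNat]
      · simp only [if_pos hv]
        rw [ih s (mid - 1) mid (by omega) (by omega)]
        have hm : ¬ mid = -1 := by omega
        by_cases hr : fo_first nums s (mid - 1) target = -1 <;> simp [hr, hm]
      · simp only [if_neg hv]
        by_cases hlt : target < nums[mid.toNat]
        · simp only [if_pos hlt]
          exact ih s (mid - 1) ti (by omega) (by omega)
        · simp only [if_neg hlt]
          exact ih (mid + 1) e ti (by omega) (by omega)
    · rw [find_occurence_loop, fo_first]
      simp [hse, (show s > e by omega)]

-- symmetric statement for flag = "last"
theorem loop_eq_last (nums : List Int) (target : Int) :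
    ∀ (n : Nat) (s e ti : Int), (e - s + 1).toNat ≤ n →
    (s > e ∨ (0 ≤ s ∧ e < (nums.length : Int))) →
    find_occurence_loop nums target (some "last") s e ti =
      (if fo_last nums s e target = -1 then ti else fo_last nums s e target) := by
  intro n
  induction n with
  | zero =>
    intro s e ti hn hpre
    have hse : ¬ s ≤ e := by omega
    rw [find_occurence_loop, fo_last]
    simp [hse, (show s > e by omega)]
  | succ n ih =>
    intro s e ti hn hpre
    by_cases hse : s ≤ e
    · have hb : 0 ≤ s ∧ e < (nums.length : Int) := by omega
      have h2 := PySem.Int.floordiv_two_mid_bounds (lo := 0) (hi := e - s) (by omega)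
      simp only [zero_add] at h2
      set mid := s + PySem.Int.floordiv (e - s) 2 with hmid
      have hget := PySem.List.pyGet?_eq_some_getElem (xs := nums) (i := mid) (by omega) (by omega)
      rw [find_occurence_loop, fo_last]
      simp only [dif_pos hse, dif_neg (show ¬ s > e by omega), ← hmid, hget]
      by_cases hv : target = nums[mid.toNat]
      · simp only [if_pos hv]
        rw [ih (mid + 1) e mid (by omega) (by omega)]
        have hm : ¬ mid = -1 := by omega
        by_cases hr : fo_last nums (mid + 1) e target = -1 <;> simp [hr, hm]
      · simp only [if_neg hv]
        by_cases hlt : target < nums[mid.toNat]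
        · simp only [if_pos hlt]
          exact ih s (mid - 1) ti (by omega) (by omega)
        · simp only [if_neg hlt]
          exact ih (mid + 1) e ti (by omega) (by omega)
    · rw [find_occurence_loop, fo_last]
      simp [hse, (show s > e by omega)]

-- any other flag: A breaks on the first hit, which is exactly fo_any's result
theorem loop_eq_any (nums : List Int) (target : Int) (flag : Option String)
    (hf : flag ≠ some "first") (hl : flag ≠ some "last") :
    ∀ (n : Nat) (s e ti : Int), (e - s + 1).toNat ≤ n →
    (s > e ∨ (0 ≤ s ∧ e < (nums.length : Int))) →
    find_occurence_loop nums target flag s e ti =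
      (if fo_any nums s e target = -1 then ti else fo_any nums s e target) := by
  intro n
  induction n with
  | zero =>
    intro s e ti hn hpre
    have hse : ¬ s ≤ e := by omega
    rw [find_occurence_loop, fo_any]
    simp [hse, (show s > e by omega)]
  | succ n ih =>
    intro s e ti hn hpre
    by_cases hse : s ≤ e
    · have hb : 0 ≤ s ∧ e < (nums.length : Int) := by omega
      have h2 := PySem.Int.floordiv_two_mid_bounds (lo := 0) (hi := e - s) (by omega)
      simp only [zero_add] at h2
      set mid := s + PySem.Int.floordiv (e - s) 2 with hmid
      have hget := PySem.List.pyGet?_eq_some_getElem (xs := nums) (i := mid) (by omega) (by omega)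
      rw [find_occurence_loop, fo_any]
      simp only [dif_pos hse, dif_neg (show ¬ s > e by omega), ← hmid, hget]
      by_cases hv : target = nums[mid.toNat]
      · simp [hv, hf, hl, (show ¬ mid = -1 by omega)]
      · simp only [if_neg hv]
        by_cases hlt : target < nums[mid.toNat]
        · simp only [if_pos hlt]
          exact ih s (mid - 1) ti (by omega) (by omega)
        · simp only [if_neg hlt]
          exact ih (mid + 1) e ti (by omega) (by omega)
    · rw [find_occurence_loop, fo_any]
      simp [hse, (show s > e by omega)]

-- ===== VERDICT (by name: the statement is the Claim_ definition above) =====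
theorem find_occurence_spec : Claim_equal_find_occurence := by
  intro nums start end_ target flag _ hpre
  unfold Spec_find_occurence find_occurence find_occurence_alt
  by_cases hf : flag = some "first"
  · rw [hf, loop_eq_first nums target (end_ - start + 1).toNat start end_ (-1) le_rfl hpre]
    by_cases hr : fo_first nums start end_ target = -1 <;> simp [hr]
  · by_cases hl : flag = some "last"
    · rw [hl, loop_eq_last nums target (end_ - start + 1).toNat start end_ (-1) le_rfl (by simpa using hpre)]
      by_cases hr : fo_last nums start end_ target = -1 <;> simp [hr]
    · rw [loop_eq_any nums target flag hf hl (end_ - start + 1).toNat start end_ (-1) le_rfl hpre]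
      by_cases hr : fo_any nums start end_ target = -1 <;> simp [hr, hf, hl]
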